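-- pv_equiv track=rewrite | github.com/yangzongwu/leetcode | 20200215Python-China/1170. Compare Strings by Frequency of the Smallest Character.py | numberFromString
-- ===== SOURCE A (Python) =====
-- def numberFromString(word):
--     s=list(_ for _ in word)
--     s.sort()
--     target=s[0]
--     cnt=1
--     for k in range(1,len(s)):
--         if s[k]==target:
--             cnt+=1
--         else:
--             break
--     return cnt
-- ===== SOURCE B (Python) =====
-- def numberFromString(word):
--     # single pass keeping the running minimum and its count (no sort)
--     best = word[0]
--     cnt = 1
--     for c in word[1:]:
--         if c < best:
--             best = c
--             cnt = 1
--         elif c == best: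
--             cnt += 1
--     return cnt
-- ===== Notes on version B (the rewrite author's own statement) =====
-- stated objective: faster
-- what changed: Replaces sort-then-count-prefix with a single linear pass that maintains the running minimum character and its occurrence count.
import Mathlib
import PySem

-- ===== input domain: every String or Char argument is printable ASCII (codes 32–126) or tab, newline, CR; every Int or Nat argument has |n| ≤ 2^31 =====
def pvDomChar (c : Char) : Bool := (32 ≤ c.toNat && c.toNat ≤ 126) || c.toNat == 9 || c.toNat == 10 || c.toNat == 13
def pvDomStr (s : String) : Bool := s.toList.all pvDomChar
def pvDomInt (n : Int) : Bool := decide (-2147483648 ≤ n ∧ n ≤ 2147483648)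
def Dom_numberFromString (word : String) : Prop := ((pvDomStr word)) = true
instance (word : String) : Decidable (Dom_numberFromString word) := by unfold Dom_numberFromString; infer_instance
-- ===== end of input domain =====

-- B replaces A's sort + prefix count with one linear pass keeping the running minimum
-- character and its count (objective: faster, O(n) vs O(n log n)).

-- ===== PORT A =====
-- the 'for k in range(1,len(s)) … break' loop: count equal chars, stop at the first different one
def pvALoop (target : Char) : List Char → Int → Int
  | [], cnt => cnt
  | c :: cs, cnt => if c = target then pvALoop target cs (cnt + 1) else cnt

def numberFromString (word : String) : Int :=
  let s := PySem.List.sorted word.toList (fun x => x) false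
  match s with
  | [] => 0   -- Python raises IndexError at s[0] here; excluded by Pre_
  | t :: rest => pvALoop t rest 1

-- ===== PORT B =====
-- the 'for c in word[1:]' loop of Source B: running minimum `best` and its count `cnt`
def pvBLoop : List Char → Char → Int → Int
  | [], _, cnt => cnt
  | c :: cs, best, cnt =>
    if c < best then pvBLoop cs c 1
    else if c = best then pvBLoop cs best (cnt + 1)
    else pvBLoop cs best cnt

def numberFromString_alt (word : String) : Int :=
  match word.toList with
  | [] => 0   -- Python raises IndexError at word[0] here; excluded by Pre_
  | c :: cs => pvBLoop cs c 1

-- ===== PRECONDITION & SPEC =====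
-- Both A and B raise IndexError on the empty string (A at s[0], B at word[0]); Pre_ excludes it.
def Pre_numberFromString (word : String) : Prop := word ≠ ""
instance (word : String) : Decidable (Pre_numberFromString word) := by unfold Pre_numberFromString; infer_instance
def pvWitness_numberFromString : String := "aabzab"

def Spec_numberFromString (word : String) (out : Int) : Prop := out = numberFromString_alt word
instance (word : String) (out : Int) : Decidable (Spec_numberFromString word out) := by unfold Spec_numberFromString; infer_instance

-- ===== CLAIM (what is proved, stated in full; the proofs are below) =====
def Claim_equal_numberFromString : Prop := ∀ (word : String), Dom_numberFromString word → Pre_numberFromString word → Spec_numberFromString word (numberFromString word)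

-- ===== LEMMAS AND PROOFS =====

-- running minimum of b :: cs, shaped like pvBLoop's state evolution
def pvMin (b : Char) : List Char → Char
  | [] => b
  | c :: cs => pvMin (min b c) cs

theorem pvMin_le_self (cs : List Char) : ∀ b : Char, pvMin b cs ≤ b := by
  induction cs with
  | nil => intro b; simp [pvMin]
  | cons c cs ih =>
    intro b
    exact le_trans (ih (min b c)) (min_le_left _ _)

theorem pvMin_mem (cs : List Char) : ∀ b : Char, pvMin b cs = b ∨ pvMin b cs ∈ cs := by
  induction cs with
  | nil => intro b; simp [pvMin]
  | cons c cs ih =>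
    intro b
    rcases ih (min b c) with h | h
    · rcases min_cases b c with ⟨hm, _⟩ | ⟨hm, _⟩
      · left; rw [pvMin, h, hm]
      · right; rw [pvMin, h, hm]; exact List.mem_cons_self
    · right; exact List.mem_cons_of_mem _ (by simpa [pvMin] using h)

theorem pvMin_le_mem (cs : List Char) : ∀ b x : Char, x ∈ cs → pvMin b cs ≤ x := by
  induction cs with
  | nil => intro b x hx; simp at hx
  | cons c cs ih =>
    intro b x hx
    rcases List.mem_cons.mp hx with rfl | hx
    · exact le_trans (pvMin_le_self cs (min b x)) (min_le_right _ _)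
    · exact ih (min b c) x hx

theorem pvCount_cons (c a : Char) (cs : List Char) :
    (((c :: cs).count a : Int)) = (cs.count a : Int) + (if c = a then 1 else 0) := by
  rw [List.count_cons]
  by_cases h : c = a
  · simp [h]
  · simp [h, Ne.symm h]

-- pvBLoop computes: count of the running minimum in the rest, plus cnt if best stays minimal
theorem pvBLoop_eq (cs : List Char) : ∀ (b : Char) (cnt : Int),
    pvBLoop cs b cnt =
      (cs.count (pvMin b cs) : Int) + (if b = pvMin b cs then cnt else 0) := by
  induction cs with
  | nil => intro b cnt; simp [pvBLoop, pvMin]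
  | cons c cs ih =>
    intro b cnt
    by_cases hlt : c < b
    · have hmin : min b c = c := min_eq_right hlt.le
      have hne : b ≠ pvMin c cs := by
        intro h
        have h1 := pvMin_le_self cs c
        rw [← h] at h1
        exact absurd hlt (not_lt.mpr h1)
      simp only [pvBLoop, if_pos hlt, pvMin, hmin, ih, pvCount_cons, if_neg hne]
      ring
    · by_cases heq : c = b
      · subst heq
        have hlt' : ¬ c < c := lt_irrefl c
        simp only [pvBLoop, if_neg hlt', pvMin, min_self, ih, pvCount_cons]
        by_cases hc : c = pvMin c cs
        · simp only [if_pos hc, if_true, eq_self_iff_true]; ring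
        · simp only [if_neg hc, if_true, eq_self_iff_true]; ring
      · have hbc : b < c := lt_of_le_of_ne (not_lt.mp hlt) (Ne.symm heq)
        have hmin : min b c = b := min_eq_left hbc.le
        have hne : c ≠ pvMin b cs := by
          intro h
          have h1 := pvMin_le_self cs b
          rw [← h] at h1
          exact absurd hbc (not_lt.mpr h1)
        simp only [pvBLoop, if_neg hlt, if_neg heq, pvMin, hmin, ih, pvCount_cons,
          if_neg hne]
        ring

-- on a sorted list t :: cs, A's break-loop counts all copies of t
theorem pvALoop_eq (cs : List Char) : ∀ (t : Char) (cnt : Int),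
    (t :: cs).Pairwise (· ≤ ·) → pvALoop t cs cnt = cnt + (cs.count t : Int) := by
  induction cs with
  | nil => intro t cnt _; simp [pvALoop]
  | cons c cs ih =>
    intro t cnt hp
    by_cases heq : c = t
    · subst heq
      have hp' : (c :: cs).Pairwise (· ≤ ·) := hp.tail
      have hstep : pvALoop c (c :: cs) cnt = pvALoop c cs (cnt + 1) := by
        simp [pvALoop]
      rw [hstep, ih c (cnt + 1) hp', pvCount_cons, if_pos rfl]
      ring
    · have htc : t < c :=
        lt_of_le_of_ne (List.rel_of_pairwise_cons hp List.mem_cons_self) (Ne.symm heq)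
      have hnm : t ∉ c :: cs := by
        intro hm
        rcases List.mem_cons.mp hm with rfl | hm
        · exact absurd htc (lt_irrefl t)
        · exact absurd (lt_of_lt_of_le htc (List.rel_of_pairwise_cons hp.tail hm))
            (lt_irrefl t)
      simp [pvALoop, heq, List.count_eq_zero_of_not_mem hnm]

-- ===== VERDICT (by name: the statement is the Claim_ definition above) =====
theorem numberFromString_spec : Claim_equal_numberFromString := by
  intro word _ hpre
  unfold Spec_numberFromString numberFromString numberFromString_alt
  have hnil : word.toList ≠ [] := by
    intro h
    exact hpre (by simpa using congrArg String.ofList h)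
  obtain ⟨c, cs, hl⟩ : ∃ c cs, word.toList = c :: cs := by
    cases h : word.toList with
    | nil => exact absurd h hnil
    | cons c cs => exact ⟨c, cs, rfl⟩
  cases hs : PySem.List.sorted word.toList (fun x => x) false with
  | nil => exact absurd ((PySem.List.sorted_eq_nil_iff _ _ _).mp hs) hnil
  | cons m rest =>
    -- the two minima agree
    have hmle : ∀ y ∈ word.toList, m ≤ y := fun y hy =>
      PySem.List.key_head_sorted_le word.toList (fun x => x) hs y hy
    have hmem_m : m ∈ word.toList := by
      have hmem : m ∈ PySem.List.sorted word.toList (fun x => x) false := by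
        rw [hs]; exact List.mem_cons_self
      exact (PySem.List.mem_sorted _ _ _ _).mp hmem
    have hμmem : pvMin c cs ∈ word.toList := by
      rw [hl]
      rcases pvMin_mem cs c with h | h
      · rw [h]; exact List.mem_cons_self
      · exact List.mem_cons_of_mem _ h
    have hμle : pvMin c cs ≤ m := by
      rw [hl] at hmem_m
      rcases List.mem_cons.mp hmem_m with rfl | h
      · exact pvMin_le_self cs m
      · exact pvMin_le_mem cs c m h
    have hmμ : m = pvMin c cs := le_antisymm (hmle _ hμmem) hμle
    -- evaluate both sides as counts of the minimum
    have hpw : (m :: rest).Pairwise (· ≤ ·) := by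
      have h := PySem.List.sorted_pairwise word.toList (fun x => x)
      rw [hs] at h
      exact h
    have hperm : (m :: rest).Perm word.toList := by
      have h := PySem.List.sorted_perm word.toList (fun x => x) false
      rw [hs] at h
      exact h
    have hA : pvALoop m rest 1 = ((m :: rest).count m : Int) := by
      rw [pvALoop_eq rest m 1 hpw, pvCount_cons, if_pos rfl]
      ring
    have hB : pvBLoop cs c 1 = ((c :: cs).count (pvMin c cs) : Int) := by
      rw [pvBLoop_eq cs c 1, pvCount_cons]
    rw [hl]
    show pvALoop m rest 1 = pvBLoop cs c 1
    rw [hA, hB, hperm.count_eq, hmμ, hl]
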